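-- pv_equiv track=rewrite | github.com/JulianneDavid/shared-cancer-splicing | figures_and_analysis/set_membership_annotation.py | check_cancer_loci
-- ===== SOURCE A (Python) =====
-- def check_cancer_loci(coding_region_entry, cancer_locus_set):
--     cancer_locus_presence = 0
--     regions = coding_region_entry.split(';')
--     all_genes = []
--     for gene_set in regions:
--         for gene in gene_set.split(','):
--             all_genes.append(gene)
--     for gene in all_genes:
--         if gene in cancer_locus_set:
--             cancer_locus_presence = 1
--
--     return cancer_locus_presence
-- ===== SOURCE B (Python) =====
-- def check_cancer_loci(coding_region_entry, cancer_locus_set):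
--     targets = set(cancer_locus_set)
--     token = []
--     for ch in coding_region_entry:
--         if ch in ';,':
--             if ''.join(token) in targets:
--                 return 1
--             token = []
--         else:
--             token.append(ch)
--     return 1 if ''.join(token) in targets else 0
-- ===== Notes on version B (the rewrite author's own statement) =====
-- stated objective: alternative
-- what changed: Replaces A's three staged passes (split on ';', re-split every region on ',', then scan the collected token list with a flag) by a single streaming character scan that maintains the current token buffer, tests it against a prebuilt target set at each delimiter, and returns 1 immediately on the first hit.
import Mathlib
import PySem

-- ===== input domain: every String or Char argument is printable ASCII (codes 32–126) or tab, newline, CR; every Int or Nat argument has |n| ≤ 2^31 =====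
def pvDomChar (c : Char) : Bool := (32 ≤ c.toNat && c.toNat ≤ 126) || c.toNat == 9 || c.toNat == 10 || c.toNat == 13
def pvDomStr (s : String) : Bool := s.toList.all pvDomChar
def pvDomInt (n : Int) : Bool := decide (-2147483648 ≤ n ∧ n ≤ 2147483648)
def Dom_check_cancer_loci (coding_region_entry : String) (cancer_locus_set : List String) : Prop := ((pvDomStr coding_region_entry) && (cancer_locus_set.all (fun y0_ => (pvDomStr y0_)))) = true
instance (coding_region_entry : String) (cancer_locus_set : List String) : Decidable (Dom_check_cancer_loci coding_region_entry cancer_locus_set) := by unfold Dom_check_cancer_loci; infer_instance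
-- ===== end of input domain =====

-- B replaces A's staged passes (split on ';', re-split on ',', scan the token list with a
-- flag) by one streaming character scan with a current-token buffer and early exit (alternative).

-- ===== PORT A =====
-- split? with the literal non-empty separators ";" / "," is always `some`; `.getD []` is exact.
def check_cancer_loci (coding_region_entry : String) (cancer_locus_set : List String) : Int :=
  let cancer_locus_presence : Int := 0
  let regions := (PySem.Str.split? coding_region_entry ";").getD []
  let all_genes := regions.foldl (fun acc gene_set =>
    ((PySem.Str.split? gene_set ",").getD []).foldl (fun a gene => a ++ [gene]) acc) []
  all_genes.foldl (fun p gene => if gene ∈ cancer_locus_set then (1 : Int) else p)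
    cancer_locus_presence

-- ===== PORT B =====
-- Source B's character loop; `ch in ';,'` is ported exactly as the two-way comparison,
-- `token.append(ch)` as `tok ++ [c]`, `''.join(token)` as `String.ofList tok`,
-- the two `return` sites as the two base results of the recursion.
def pvScanGo (targets : PySem.Set String) (tok : List Char) : List Char → Int
  | [] => if String.ofList tok ∈ targets then 1 else 0
  | c :: rest =>
    if c = ';' ∨ c = ',' then
      if String.ofList tok ∈ targets then 1 else pvScanGo targets [] rest
    else pvScanGo targets (tok ++ [c]) rest

def check_cancer_loci_alt (coding_region_entry : String) (cancer_locus_set : List String) : Int :=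
  let targets := PySem.Set.ofList cancer_locus_set
  pvScanGo targets [] coding_region_entry.toList

-- ===== PRECONDITION & SPEC =====
def Spec_check_cancer_loci (coding_region_entry : String) (cancer_locus_set : List String) (out : Int) : Prop := out = check_cancer_loci_alt coding_region_entry cancer_locus_set
instance (coding_region_entry : String) (cancer_locus_set : List String) (out : Int) : Decidable (Spec_check_cancer_loci coding_region_entry cancer_locus_set out) := by unfold Spec_check_cancer_loci; infer_instance

-- ===== CLAIM (what is proved, stated in full; the proofs are below) =====
def Claim_equal_check_cancer_loci : Prop := ∀ (coding_region_entry : String) (cancer_locus_set : List String), Dom_check_cancer_loci coding_region_entry cancer_locus_set → Spec_check_cancer_loci coding_region_entry cancer_locus_set (check_cancer_loci coding_region_entry cancer_locus_set)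

-- ===== LEMMAS AND PROOFS =====

-- Tokenisation on a single delimiter, structurally (`pvTok d l` = `''.join(l).split(d)`).
def pvTok (d : Char) : List Char → List (List Char)
  | [] => [[]]
  | c :: t =>
    if c = d then [] :: pvTok d t
    else
      match pvTok d t with
      | [] => [[c]]
      | h :: r => (c :: h) :: r

-- Tokenisation on both delimiters at once (what B's scanner walks through).
def pvTokB : List Char → List (List Char)
  | [] => [[]]
  | c :: t =>
    if c = ';' ∨ c = ',' then [] :: pvTokB t
    else
      match pvTokB t with
      | [] => [[c]]
      | h :: r => (c :: h) :: r

theorem pvTok_ne_nil (d : Char) (l : List Char) : pvTok d l ≠ [] := by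
  cases l with
  | nil => simp [pvTok]
  | cons c t =>
    simp only [pvTok]
    split
    · simp
    · split <;> simp

theorem pvTokB_ne_nil (l : List Char) : pvTokB l ≠ [] := by
  cases l with
  | nil => simp [pvTokB]
  | cons c t =>
    simp only [pvTokB]
    split
    · simp
    · split <;> simp

theorem go_single (d : Char) (l : List Char) (fuel : Nat) (cur : List Char)
    (acc : List (List Char)) (h : l.length < fuel) :
    PySem.Chars.splitOn.go [d] fuel l cur acc =
      acc.reverse ++
        (match pvTok d l with
         | [] => []
         | hd :: r => (cur.reverse ++ hd) :: r) := by
  induction l generalizing fuel cur acc with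
  | nil =>
    cases fuel with
    | zero => omega
    | succ f =>
      rw [PySem.Chars.splitOn.go]; simp [pvTok]; omega
  | cons c t ih =>
    cases fuel with
    | zero => omega
    | succ f =>
      rw [PySem.Chars.splitOn.go]
      by_cases hc : c = d
      · have hp : List.isPrefixOf [d] (c :: t) = true := by
          simp [List.isPrefixOf, hc]
        simp only [hp, if_true, List.length_cons, List.drop_succ_cons, List.length_nil,
          List.drop_zero]
        rw [ih f [] (cur.reverse :: acc) (by simp at h; omega)]
        rcases hh : pvTok d t with _ | ⟨hd, r⟩
        · exact absurd hh (pvTok_ne_nil d t)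
        · simp [pvTok, hc, hh]
      · have hp : List.isPrefixOf [d] (c :: t) = false := by
          simp [List.isPrefixOf]
          exact fun h' => hc h'.symm
        simp only [hp, Bool.false_eq_true, if_false]
        rw [ih f (c :: cur) acc (by simp at h; omega)]
        rcases hh : pvTok d t with _ | ⟨hd, r⟩
        · exact absurd hh (pvTok_ne_nil d t)
        · simp [pvTok, hc, hh]

theorem splitOn_single (d : Char) (l : List Char) :
    PySem.Chars.splitOn l [d] = pvTok d l := by
  rw [PySem.Chars.splitOn, go_single d l _ [] [] (by omega)]
  rcases hh : pvTok d l with _ | ⟨hd, r⟩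
  · exact absurd hh (pvTok_ne_nil d l)
  · simp

-- pvTokB = flatten of the two staged single-delimiter splits.
theorem pvTokB_eq (l : List Char) :
    pvTokB l = (pvTok ';' l).flatMap (pvTok ',') := by
  induction l with
  | nil => simp [pvTokB, pvTok]
  | cons c t ih =>
    by_cases hc : c = ';'
    · simp only [pvTokB, hc, true_or, if_true, ih, pvTok, if_pos rfl]
      rfl
    · rcases hh : pvTok ';' t with _ | ⟨hd, r⟩
      · exact absurd hh (pvTok_ne_nil ';' t)
      · rcases hh2 : pvTok ',' hd with _ | ⟨hd2, r2⟩
        · exact absurd hh2 (pvTok_ne_nil ',' hd)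
        · by_cases hc2 : c = ','
          · subst hc2
            simp [pvTokB, pvTok, hh, ih, List.flatMap_cons, hc]
          · have hor : ¬ (c = ';' ∨ c = ',') := by tauto
            simp only [pvTokB, if_neg hor, ih, pvTok, if_neg hc, hh, List.flatMap_cons,
              if_neg hc2, hh2]
            rcases hflat : (pvTok ',' hd ++ r.flatMap (pvTok ',')) with _ | ⟨a, b⟩
            · rw [hh2] at hflat; simp at hflat
            · rw [hh2] at hflat
              simp only [List.cons_append] at hflat
              obtain ⟨rfl, rfl⟩ : hd2 = a ∧ r2 ++ r.flatMap (pvTok ',') = b := by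
                constructor <;> [exact (List.cons.injEq _ _ _ _ ▸ hflat).1;
                  exact (List.cons.injEq _ _ _ _ ▸ hflat).2]
              simp

-- A's flag loop: the result is 1 iff some element is a member.
theorem foldl_flag (cls : List String) (l : List String) (a : Int) :
    l.foldl (fun p g => if g ∈ cls then (1 : Int) else p) a =
      if l.any (fun g => decide (g ∈ cls)) then 1 else a := by
  induction l generalizing a with
  | nil => simp
  | cons c t ih =>
    by_cases h : c ∈ cls <;> simp [h, ih]

theorem split_comma_toList (s : String) :
    ((PySem.Str.split? s ",").getD []).map String.toList = pvTok ',' s.toList := by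
  have h := PySem.Str.split?_map s ","
  rw [PySem.Chars.split?] at h
  simp only [show (",".toList) = [','] from rfl] at h
  simp only [List.isEmpty_cons, Bool.false_eq_true, if_false] at h
  rcases hs : PySem.Str.split? s "," with _ | l
  · rw [hs] at h; simp at h
  · rw [hs] at h
    simp only [Option.map_some, Option.some.injEq] at h
    simp [h, splitOn_single]

theorem split_semi_toList (s : String) :
    ((PySem.Str.split? s ";").getD []).map String.toList = pvTok ';' s.toList := by
  have h := PySem.Str.split?_map s ";"
  rw [PySem.Chars.split?] at h
  simp only [show (";".toList) = [';'] from rfl] at h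
  simp only [List.isEmpty_cons, Bool.false_eq_true, if_false] at h
  rcases hs : PySem.Str.split? s ";" with _ | l
  · rw [hs] at h; simp at h
  · rw [hs] at h
    simp only [Option.map_some, Option.some.injEq] at h
    simp [h, splitOn_single]

-- B's scanner computes "some token of (tok-prefixed) pvTokB is a member" directly.
theorem scan_eq (T : PySem.Set String) (l : List Char) : ∀ tok : List Char,
    pvScanGo T tok l =
      if (decide (String.ofList (tok ++ (pvTokB l).headI) ∈ T)
          || ((pvTokB l).tail.any fun g => decide (String.ofList g ∈ T))) then 1 else 0 := by
  induction l with
  | nil =>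
    intro tok
    simp [pvScanGo, pvTokB, List.headI]
  | cons c t ih =>
    intro tok
    by_cases hc : c = ';' ∨ c = ','
    · rcases hh : pvTokB t with _ | ⟨hd, r⟩
      · exact absurd hh (pvTokB_ne_nil t)
      · simp only [pvScanGo, if_pos hc, pvTokB, hh, List.headI, List.tail_cons,
          List.append_nil, List.any_cons]
        by_cases hm : String.ofList tok ∈ T
        · simp [hm]
        · simp only [if_neg hm, ih [], hh, List.headI, List.tail_cons, List.nil_append]
          simp [hm]
    · rcases hh : pvTokB t with _ | ⟨hd, r⟩
      · exact absurd hh (pvTokB_ne_nil t)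
      · simp only [pvScanGo, if_neg hc, pvTokB, hh, ih (tok ++ [c]), List.headI,
          List.tail_cons, List.append_assoc, List.singleton_append]

theorem pv_main (s : String) (cls : List String) :
    check_cancer_loci s cls = check_cancer_loci_alt s cls := by
  simp only [check_cancer_loci, check_cancer_loci_alt]
  have hbuild : ∀ (regions : List String),
      regions.foldl (fun acc gene_set =>
        ((PySem.Str.split? gene_set ",").getD []).foldl (fun a gene => a ++ [gene]) acc) [] =
      regions.flatMap (fun gene_set => (PySem.Str.split? gene_set ",").getD []) := by
    intro regions
    rw [PySem.List.foldl_congr_mem regions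
      (fun acc gene_set => ((PySem.Str.split? gene_set ",").getD []).foldl
        (fun a gene => a ++ [gene]) acc)
      (fun acc gene_set => acc ++ (PySem.Str.split? gene_set ",").getD []) []
      (by intro acc x _; simp only []; rw [PySem.List.foldl_append_singleton_eq_self])]
    rw [PySem.List.foldl_append_eq_flatMap]
    simp
  rw [hbuild, foldl_flag]
  -- the flattened two-stage token list, as char lists, is pvTokB
  set all_genes := ((PySem.Str.split? s ";").getD []).flatMap
      (fun gene_set => (PySem.Str.split? gene_set ",").getD []) with hall
  have htoks : all_genes.map String.toList = pvTokB s.toList := by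
    rw [hall, pvTokB_eq, ← split_semi_toList, List.map_flatMap, List.flatMap_map]
    congr 1
    funext gs
    rw [split_comma_toList]
  -- hence all_genes = (pvTokB s.toList).map String.ofList
  have hmk : all_genes = (pvTokB s.toList).map String.ofList := by
    have : (all_genes.map String.toList).map String.ofList = all_genes := by
      rw [List.map_map]
      simp [Function.comp_def, String.ofList_toList]
    rw [← this, htoks]
  rw [scan_eq]
  rcases hh : pvTokB s.toList with _ | ⟨hd, r⟩
  · exact absurd hh (pvTokB_ne_nil s.toList)
  · simp only [List.headI, List.tail_cons, List.nil_append]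
    rw [hmk, hh]
    simp only [List.map_cons, List.any_cons, List.any_map, Function.comp_def]
    simp [PySem.Set.mem_ofList]

-- ===== VERDICT (by name: the statement is the Claim_ definition above) =====
theorem check_cancer_loci_spec : Claim_equal_check_cancer_loci := by
  intro coding_region_entry cancer_locus_set _
  unfold Spec_check_cancer_loci
  exact pv_main coding_region_entry cancer_locus_set
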